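-- pv_equiv track=rewrite | github.com/victormeloasm/HippoFrog | SAGE Math Scripts/Reproducing_ECCFROG522PP_home.py | squarefree_sanity
-- ===== SOURCE A (Python) =====
-- def squarefree_sanity(n, limit):
--     n = abs(int(n))
--     for q in range(2, limit + 1):
--         q2 = q * q
--         if q2 > n:
--             break
--         if n % q2 == 0:
--             return False, q
--     return True, None
-- ===== SOURCE B (Python) =====
-- def squarefree_sanity(n, limit):
--     # Trial division: walk candidate divisors d, stripping each found (prime)
--     # factor out of m; report the first prime whose square divides n (within limit).
--     m = abs(int(n))
--     d = 2
--     while d * d <= m: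
--         if m % d == 0:
--             if d > limit:
--                 return True, None
--             m //= d
--             if m % d == 0:
--                 return False, d
--         d += 1
--     return True, None
-- ===== Notes on version B (the rewrite author's own statement) =====
-- stated objective: alternative
-- what changed: A scans every candidate q from 2 up and tests q*q | n on the unchanged n; B trial-divides n, stripping each found (necessarily prime) factor out of a shrinking m, and answers at the first prime whose square divides n, exiting early once the smallest remaining factor exceeds limit.
import Mathlib
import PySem

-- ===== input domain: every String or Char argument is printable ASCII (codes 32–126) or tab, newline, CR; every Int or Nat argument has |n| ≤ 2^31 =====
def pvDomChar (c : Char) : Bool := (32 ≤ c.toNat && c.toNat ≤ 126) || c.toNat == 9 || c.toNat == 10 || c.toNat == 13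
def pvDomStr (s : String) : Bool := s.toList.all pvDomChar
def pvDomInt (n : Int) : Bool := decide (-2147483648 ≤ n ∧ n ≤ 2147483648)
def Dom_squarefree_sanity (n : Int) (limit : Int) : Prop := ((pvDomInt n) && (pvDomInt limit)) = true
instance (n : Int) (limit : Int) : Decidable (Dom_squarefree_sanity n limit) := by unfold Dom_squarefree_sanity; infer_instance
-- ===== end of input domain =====

-- B replaces A's scan of every candidate q with q² | n by trial-division factorization of n,
-- stripping each found prime factor and answering at the first prime whose square divides n (alternative decomposition).

-- ===== PORT A =====
-- 'for q in range(2, limit+1): …' with break/return, over fixed N = abs(n); the range is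
-- iterated lazily (as Python's range does) by counting q upward, fuel = the range's length
def pvALoop (N limit : Int) : Nat → Int → Bool × Option Int
  | 0, _ => (true, none)
  | fuel + 1, q =>
    if q < limit + 1 then
      if q * q > N then (true, none)
      else if PySem.Int.mod N (q * q) = 0 then (false, some q)
      else pvALoop N limit fuel (q + 1)
    else (true, none)

def squarefree_sanity (n : Int) (limit : Int) : Bool × Option Int :=
  pvALoop (n.natAbs : Int) limit (limit + 1 - 2).toNat 2

-- ===== PORT B =====
-- 'while d*d <= m: …' of Source B; m shrinks as factors are divided out.
-- The loop is made structurally recursive on a fuel counter; the supplied fuel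
-- 2*|n|+2 always dominates the loop's variant 2*m - d + 1, so the 0-fuel arm is never reached.
def pvBLoop (limit : Int) : Nat → Int → Int → Bool × Option Int
  | 0, _, _ => (true, none)
  | fuel + 1, m, d =>
    if d * d ≤ m then
      if PySem.Int.mod m d = 0 then
        if d > limit then (true, none)
        else
          if PySem.Int.mod (PySem.Int.floordiv m d) d = 0 then (false, some d)
          else pvBLoop limit fuel (PySem.Int.floordiv m d) (d + 1)
      else pvBLoop limit fuel m (d + 1)
    else (true, none)

def squarefree_sanity_alt (n : Int) (limit : Int) : Bool × Option Int :=
  pvBLoop limit (2 * n.natAbs + 2) (n.natAbs : Int) 2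

-- ===== PRECONDITION & SPEC =====
def Spec_squarefree_sanity (n : Int) (limit : Int) (out : Bool × Option Int) : Prop := out = squarefree_sanity_alt n limit
instance (n : Int) (limit : Int) (out : Bool × Option Int) : Decidable (Spec_squarefree_sanity n limit out) := by unfold Spec_squarefree_sanity; infer_instance

-- ===== CLAIM (what is proved, stated in full; the proofs are below) =====
def Claim_equal_squarefree_sanity : Prop := ∀ (n : Int) (limit : Int), Dom_squarefree_sanity n limit → Spec_squarefree_sanity n limit (squarefree_sanity n limit)

-- ===== LEMMAS AND PROOFS =====

-- pvQ N limit q : q is a hit of A's search, over N = |n|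
def pvQ (N limit q : Int) : Prop := 2 ≤ q ∧ q ≤ limit ∧ q * q ≤ N ∧ q * q ∣ N

-- A's loop finds the least hit q₀ (scanning from a ≤ q₀; everything in [2,a) is a non-hit by minimality)
theorem pvALoop_found (N limit q₀ : Int) (hN : 0 ≤ N)
    (hq : pvQ N limit q₀) (hmin : ∀ q, pvQ N limit q → q₀ ≤ q) :
    ∀ (fuel : Nat) (a : Int), 2 ≤ a → a ≤ q₀ → (limit + 1 - a).toNat ≤ fuel →
      pvALoop N limit fuel a = (false, some q₀) := by
  obtain ⟨h2, hlim, hle, hdvd⟩ := hq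
  intro fuel
  induction fuel with
  | zero =>
    intro a ha haq hk
    exfalso
    omega
  | succ fuel ih =>
    intro a ha haq hk
    simp only [pvALoop]
    rw [if_pos (by omega)]
    by_cases hEnd : a = q₀
    · subst hEnd
      rw [if_neg (by omega), if_pos ((PySem.Int.mod_eq_zero_iff_dvd _ _).2 hdvd)]
    · have halt : a < q₀ := lt_of_le_of_ne haq hEnd
      have hsq : a * a ≤ N := by nlinarith
      rw [if_neg (by omega)]
      have hnd : ¬ PySem.Int.mod N (a * a) = 0 := by
        rw [PySem.Int.mod_eq_zero_iff_dvd]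
        intro hdv
        have : q₀ ≤ a := hmin a ⟨ha, by omega, hsq, hdv⟩
        omega
      rw [if_neg hnd]
      exact ih (a + 1) (by omega) (by omega) (by omega)

-- when there is no hit, A's loop returns (true, none)
theorem pvALoop_none (N limit : Int) (hN : 0 ≤ N) (h : ∀ q, ¬ pvQ N limit q) :
    ∀ (fuel : Nat) (a : Int), 2 ≤ a → (limit + 1 - a).toNat ≤ fuel →
      pvALoop N limit fuel a = (true, none) := by
  intro fuel
  induction fuel with
  | zero =>
    intro a ha hk
    rfl
  | succ fuel ih =>
    intro a ha hk
    simp only [pvALoop]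
    by_cases hend : limit + 1 ≤ a
    · rw [if_neg (by omega)]
    · rw [if_pos (by omega)]
      by_cases hbig : a * a > N
      · rw [if_pos hbig]
      · rw [if_neg hbig]
        have hnd : ¬ PySem.Int.mod N (a * a) = 0 := by
          rw [PySem.Int.mod_eq_zero_iff_dvd]
          intro hdv
          exact h a ⟨ha, by omega, by omega, hdv⟩
        rw [if_neg hnd]
        exact ih (a + 1) (by omega) (by omega)

-- the invariant of B's loop: m is N with all primes < d (each of exponent 1 in N) divided out
def pvInv (N limit m d : Int) : Prop :=
  0 < N ∧ 0 < m ∧ 2 ≤ d ∧ m ∣ N ∧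
  (∃ c, N = c * m ∧ ∀ p, Prime p → 0 < p → p ∣ c → p < d) ∧
  (∀ k, 1 < k → k < d → ¬ k ∣ m) ∧
  (∀ q, 2 ≤ q → q < d → ¬ q * q ∣ N)

-- a prime square divides c*m and misses c, so it divides m
theorem pv_sq_pull {p c m : Int} (hp : Prime p) (hpc : ¬ p ∣ c) (h : p * p ∣ c * m) : p * p ∣ m := by
  have h1 : p ∣ c * m := dvd_trans (dvd_mul_left p p) h
  have h2 : p ∣ m := (hp.dvd_mul.1 h1).resolve_left hpc
  obtain ⟨m₁, rfl⟩ := h2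
  have h3 : p ∣ c * m₁ := by
    have : p * p ∣ p * (c * m₁) := by
      have : c * (p * m₁) = p * (c * m₁) := by ring
      rwa [this] at h
    exact (mul_dvd_mul_iff_left hp.ne_zero).1 this
  have h4 : p ∣ m₁ := (hp.dvd_mul.1 h3).resolve_left hpc
  obtain ⟨m₂, rfl⟩ := h4
  exact ⟨m₂, by ring⟩

-- casting a Nat prime to Int
theorem pv_natCast_prime {p : Nat} (hp : p.Prime) : Prime (p : Int) :=
  Nat.prime_iff_prime_int.1 hp

-- a positive prime dividing a positive prime equals it
theorem pv_prime_dvd_prime {p d : Int} (hp : Prime p) (hppos : 0 < p) (hd : Prime d)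
    (hdpos : 0 < d) (hdvd : p ∣ d) : p = d := by
  have hpn : p.natAbs.Prime := Int.prime_iff_natAbs_prime.1 hp
  have hdn : d.natAbs.Prime := Int.prime_iff_natAbs_prime.1 hd
  have h1 : p.natAbs ∣ d.natAbs := Int.natAbs_dvd_natAbs.2 hdvd
  have h2 : p.natAbs = 1 ∨ p.natAbs = d.natAbs := (Nat.Prime.eq_one_or_self_of_dvd hdn _ h1)
  rcases h2 with h2 | h2
  · exact absurd h2 hpn.ne_one
  · omega

-- the least divisor ≥ 2 of m is prime
theorem pv_least_divisor_prime {m d : Int} (hm : 0 < m) (h2 : 2 ≤ d) (hdvd : d ∣ m)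
    (hleast : ∀ k, 1 < k → k < d → ¬ k ∣ m) : Prime d := by
  set p : Nat := d.toNat.minFac with hp
  have hdt : d.toNat ≠ 1 := by omega
  have hpp : p.Prime := Nat.minFac_prime hdt
  have hpd : (p : Int) ∣ d := by
    have := Nat.minFac_dvd d.toNat
    have h' : (p : Int) ∣ (d.toNat : Int) := Int.natCast_dvd_natCast.2 this
    rwa [Int.toNat_of_nonneg (by omega)] at h'
  have hple : (p : Int) ≤ d := Int.le_of_dvd (by omega) hpd
  have hp2 : 2 ≤ (p : Int) := by exact_mod_cast hpp.two_le
  by_cases hlt : (p : Int) < d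
  · exact absurd (dvd_trans hpd hdvd) (hleast _ (by omega) hlt)
  · have : (p : Int) = d := by omega
    rw [← this]
    exact pv_natCast_prime hpp

-- under the invariant, a prime square hit at p ≥ d transfers from N to m
theorem pv_sq_transfer {N limit m d p : Int} (hinv : pvInv N limit m d)
    (hp : Prime p) (hdp : d ≤ p) (hdvd : p * p ∣ N) : p * p ∣ m := by
  obtain ⟨hN, hm, hd2, hmN, ⟨c, hc, hcp⟩, hI3, hI4⟩ := hinv
  have hpc : ¬ p ∣ c := fun hpc => by
    have := hcp p hp (by omega) hpc
    omega
  exact pv_sq_pull hp hpc (hc ▸ hdvd)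

-- under the invariant, d² ∣ N forces d prime
theorem pv_d_prime_of_sq {N limit m d : Int} (hinv : pvInv N limit m d) (hdvd : d * d ∣ N) :
    Prime d := by
  obtain ⟨hN, hm, hd2, hmN, hcEx, hI3, hI4⟩ := hinv
  set p : Nat := d.toNat.minFac with hp
  have hdt : d.toNat ≠ 1 := by omega
  have hpp : p.Prime := Nat.minFac_prime hdt
  have hpd : (p : Int) ∣ d := by
    have := Nat.minFac_dvd d.toNat
    have h' : (p : Int) ∣ (d.toNat : Int) := Int.natCast_dvd_natCast.2 this
    rwa [Int.toNat_of_nonneg (by omega)] at h'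
  have hple : (p : Int) ≤ d := Int.le_of_dvd (by omega) hpd
  have hp2 : 2 ≤ (p : Int) := by exact_mod_cast hpp.two_le
  by_cases hlt : (p : Int) < d
  · exact absurd (dvd_trans (mul_dvd_mul hpd hpd) hdvd) (hI4 _ hp2 hlt)
  · have : (p : Int) = d := by omega
    rw [← this]
    exact pv_natCast_prime hpp

-- invariant step when d does not divide m
theorem pv_inv_step_ndvd {N limit m d : Int} (hinv : pvInv N limit m d) (hnd : ¬ d ∣ m) :
    pvInv N limit m (d + 1) := by
  obtain ⟨hN, hm, hd2, hmN, ⟨c, hc, hcp⟩, hI3, hI4⟩ := hinv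
  refine ⟨hN, hm, by omega, hmN, ⟨c, hc, fun p hp hppos hpc => by have := hcp p hp hppos hpc; omega⟩, ?_, ?_⟩
  · intro k hk1 hkd
    by_cases hkd' : k < d
    · exact hI3 k hk1 hkd'
    · have : k = d := by omega
      subst this
      exact hnd
  · intro q hq2 hqd
    by_cases hqd' : q < d
    · exact hI4 q hq2 hqd'
    · have : q = d := by omega
      subst this
      intro hdv
      have hdp : Prime q := pv_d_prime_of_sq (limit := limit) ⟨hN, hm, hd2, hmN, ⟨c, hc, hcp⟩, hI3, hI4⟩ hdv
      have : q * q ∣ m := pv_sq_transfer (limit := limit) ⟨hN, hm, hd2, hmN, ⟨c, hc, hcp⟩, hI3, hI4⟩ hdp le_rfl hdv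
      exact hnd (dvd_trans (dvd_mul_left q q) this)

-- invariant step when d divides m exactly once
theorem pv_inv_step_dvd {N limit m d : Int} (hinv : pvInv N limit m d) (hdm : d ∣ m)
    (hnd : ¬ d ∣ (m / d)) : pvInv N limit (m / d) (d + 1) := by
  obtain ⟨hN, hm, hd2, hmN, ⟨c, hc, hcp⟩, hI3, hI4⟩ := hinv
  have hdprime : Prime d := pv_least_divisor_prime hm hd2 hdm hI3
  have hmd : m = d * (m / d) := (Int.mul_ediv_cancel' hdm).symm
  have hmdpos : 0 < m / d := by
    by_cases h' : 0 < m / d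
    · exact h'
    · push_neg at h'
      nlinarith [hmd]
  have hmddvd : m / d ∣ m := ⟨d, by rw [mul_comm]; exact hmd⟩
  refine ⟨hN, hmdpos, by omega, dvd_trans hmddvd hmN, ⟨c * d, by rw [hc]; nth_rewrite 1 [hmd]; ring, ?_⟩, ?_, ?_⟩
  · intro p hp hppos hpc
    rcases hp.dvd_mul.1 hpc with h | h
    · have := hcp p hp hppos h
      omega
    · have : p = d := pv_prime_dvd_prime hp hppos hdprime (by omega) h
      omega
  · intro k hk1 hkd hkdvd
    by_cases hkd' : k < d
    · exact hI3 k hk1 hkd' (dvd_trans hkdvd hmddvd)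
    · have : k = d := by omega
      subst this
      exact hnd hkdvd
  · intro q hq2 hqd
    by_cases hqd' : q < d
    · exact hI4 q hq2 hqd'
    · have : q = d := by omega
      subst this
      intro hdv
      have hsq : q * q ∣ m := pv_sq_transfer (limit := limit) ⟨hN, hm, hd2, hmN, ⟨c, hc, hcp⟩, hI3, hI4⟩ hdprime le_rfl hdv
      apply hnd
      have hqne : q ≠ 0 := by omega
      obtain ⟨t, ht⟩ := hsq
      exact ⟨t, by rw [ht, mul_assoc, Int.mul_ediv_cancel_left _ hqne]⟩
  
-- the least hit of A's search is prime
theorem pv_least_hit_prime {N limit q₀ : Int} (hN : 0 < N) (hq : pvQ N limit q₀)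
    (hmin : ∀ q, pvQ N limit q → q₀ ≤ q) : Prime q₀ := by
  obtain ⟨h2, hlim, hle, hdvd⟩ := hq
  set p : Nat := q₀.toNat.minFac with hp
  have hqt : q₀.toNat ≠ 1 := by omega
  have hpp : p.Prime := Nat.minFac_prime hqt
  have hpd : (p : Int) ∣ q₀ := by
    have := Nat.minFac_dvd q₀.toNat
    have h' : (p : Int) ∣ (q₀.toNat : Int) := Int.natCast_dvd_natCast.2 this
    rwa [Int.toNat_of_nonneg (by omega)] at h'
  have hple : (p : Int) ≤ q₀ := Int.le_of_dvd (by omega) hpd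
  have hp2 : 2 ≤ (p : Int) := by exact_mod_cast hpp.two_le
  have hQp : pvQ N limit p :=
    ⟨hp2, by omega, by nlinarith, dvd_trans (mul_dvd_mul hpd hpd) hdvd⟩
  have : q₀ ≤ (p : Int) := hmin _ hQp
  have : (p : Int) = q₀ := by omega
  rw [← this]
  exact pv_natCast_prime hpp

-- B's loop finds the least hit q₀ (which is prime and still fully present in m)
theorem pvBLoop_found (N limit q₀ : Int) (hN : 0 < N) (hq : pvQ N limit q₀)
    (hmin : ∀ q, pvQ N limit q → q₀ ≤ q) :
    ∀ (fuel : Nat) (m d : Int), pvInv N limit m d → d ≤ q₀ → (2 * m - d + 1).toNat ≤ fuel →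
      pvBLoop limit fuel m d = (false, some q₀) := by
  have hprime : Prime q₀ := pv_least_hit_prime hN hq hmin
  obtain ⟨h2, hlim, hle, hdvd⟩ := hq
  intro fuel
  induction fuel with
  | zero =>
    intro m d hinv hdq hk
    exfalso
    have hd2 := hinv.2.2.1
    have hmpos := hinv.2.1
    have hsqm : q₀ * q₀ ∣ m := pv_sq_transfer hinv hprime hdq hdvd
    have hqm : q₀ * q₀ ≤ m := Int.le_of_dvd hmpos hsqm
    have hdm : d ≤ m := by nlinarith
    omega
  | succ fuel ih =>
    intro m d hinv hdq hk
    have hd2 := hinv.2.2.1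
    have hmpos := hinv.2.1
    have hsqm : q₀ * q₀ ∣ m := pv_sq_transfer hinv hprime hdq hdvd
    have hqm : q₀ * q₀ ≤ m := Int.le_of_dvd hmpos hsqm
    have hguard : d * d ≤ m := by nlinarith
    simp only [pvBLoop]
    rw [if_pos hguard]
    by_cases hEnd : d = q₀
    · subst hEnd
      have hdm : d ∣ m := dvd_trans (dvd_mul_left d d) hsqm
      rw [if_pos ((PySem.Int.mod_eq_zero_iff_dvd _ _).2 hdm), if_neg (by omega)]
      have hfd : PySem.Int.floordiv m d = m / d := PySem.Int.floordiv_eq_ediv_of_pos (by omega)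
      have hddvd : d ∣ m / d := by
        have hdne : d ≠ 0 := by omega
        obtain ⟨t, ht⟩ := hsqm
        exact ⟨t, by rw [ht, mul_assoc, Int.mul_ediv_cancel_left _ hdne]⟩
      rw [hfd, if_pos ((PySem.Int.mod_eq_zero_iff_dvd _ _).2 hddvd)]
    · have hdlt : d < q₀ := lt_of_le_of_ne hdq hEnd
      by_cases hdm : d ∣ m
      · rw [if_pos ((PySem.Int.mod_eq_zero_iff_dvd _ _).2 hdm), if_neg (by omega)]
        have hfd : PySem.Int.floordiv m d = m / d := PySem.Int.floordiv_eq_ediv_of_pos (by omega)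
        rw [hfd]
        have hmd : m = d * (m / d) := (Int.mul_ediv_cancel' hdm).symm
        have hnd : ¬ d ∣ m / d := by
          intro hdd
          have hsqN : d * d ∣ N := by
            have : d * d ∣ m := by
              obtain ⟨t, ht⟩ := hdd
              exact ⟨t, by rw [hmd, ht]; ring⟩
            exact dvd_trans this hinv.2.2.2.1
          have : q₀ ≤ d := hmin d ⟨by omega, by omega, Int.le_of_dvd hN hsqN, hsqN⟩
          omega
        rw [if_neg (by rw [PySem.Int.mod_eq_zero_iff_dvd]; exact hnd)]
        have hmdlt : m / d < m := by
          have h0 : 0 < m / d := by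
            by_cases h' : 0 < m / d
            · exact h'
            · push_neg at h'
              nlinarith [hmd]
          nlinarith [hmd]
        have hdlem : d ≤ m := by nlinarith
        have hb : (2 * (m / d) - (d + 1) + 1).toNat ≤ fuel := by
          generalize hJ : m / d = j at hmdlt ⊢
          omega
        exact ih (m / d) (d + 1) (pv_inv_step_dvd hinv hdm hnd) (by omega) hb
      · rw [if_neg (by rw [PySem.Int.mod_eq_zero_iff_dvd]; exact hdm)]
        have hdlem : d ≤ m := by nlinarith
        exact ih m (d + 1) (pv_inv_step_ndvd hinv hdm) (by omega) (by omega)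

-- when there is no hit, B's loop returns (true, none)
theorem pvBLoop_none (N limit : Int) (hN : 0 < N) (h : ∀ q, ¬ pvQ N limit q) :
    ∀ (fuel : Nat) (m d : Int), pvInv N limit m d → (2 * m - d + 1).toNat ≤ fuel →
      pvBLoop limit fuel m d = (true, none) := by
  intro fuel
  induction fuel with
  | zero =>
    intro m d hinv hk
    rfl
  | succ fuel ih =>
    intro m d hinv hk
    have hd2 := hinv.2.2.1
    have hmpos := hinv.2.1
    simp only [pvBLoop]
    by_cases hguard : d * d ≤ m
    · rw [if_pos hguard]
      by_cases hdm : d ∣ m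
      · rw [if_pos ((PySem.Int.mod_eq_zero_iff_dvd _ _).2 hdm)]
        by_cases hlim : d > limit
        · rw [if_pos hlim]
        · rw [if_neg hlim]
          have hfd : PySem.Int.floordiv m d = m / d := PySem.Int.floordiv_eq_ediv_of_pos (by omega)
          rw [hfd]
          have hmd : m = d * (m / d) := (Int.mul_ediv_cancel' hdm).symm
          have hnd : ¬ d ∣ m / d := by
            intro hdd
            have hsqN : d * d ∣ N := by
              have : d * d ∣ m := by
                obtain ⟨t, ht⟩ := hdd
                exact ⟨t, by rw [hmd, ht]; ring⟩
              exact dvd_trans this hinv.2.2.2.1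
            exact h d ⟨by omega, by omega, Int.le_of_dvd hN hsqN, hsqN⟩
          rw [if_neg (by rw [PySem.Int.mod_eq_zero_iff_dvd]; exact hnd)]
          have hmdlt : m / d < m := by
            have h0 : 0 < m / d := by
              by_cases h' : 0 < m / d
              · exact h'
              · push_neg at h'
                nlinarith [hmd]
            nlinarith [hmd]
          have hdlem : d ≤ m := by nlinarith
          have hb : (2 * (m / d) - (d + 1) + 1).toNat ≤ fuel := by
            generalize hJ : m / d = j at hmdlt ⊢
            omega
          exact ih (m / d) (d + 1) (pv_inv_step_dvd hinv hdm hnd) hb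
      · rw [if_neg (by rw [PySem.Int.mod_eq_zero_iff_dvd]; exact hdm)]
        have hdlem : d ≤ m := by nlinarith
        exact ih m (d + 1) (pv_inv_step_ndvd hinv hdm) (by omega)
    · rw [if_neg hguard]

-- B's loop on m = 0 stops at once (the guard 2*2 ≤ 0 fails, whatever the fuel)
theorem pvBLoop_zeroN (limit : Int) (fuel : Nat) : pvBLoop limit fuel 0 2 = (true, none) := by
  cases fuel with
  | zero => rfl
  | succ fuel => simp only [pvBLoop]; rw [if_neg (by omega)]

-- the initial invariant
theorem pv_inv_init (N limit : Int) (hN : 0 < N) : pvInv N limit N 2 :=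
  ⟨hN, hN, le_rfl, dvd_refl N,
    ⟨1, (one_mul N).symm, fun p hp hppos hpc => absurd (Int.eq_one_of_dvd_one (by omega) hpc) (by
      intro h1; exact hp.ne_one h1)⟩,
    fun k hk1 hkd => absurd hk1 (by omega),
    fun q hq2 hqd => absurd hq2 (by omega)⟩

-- ===== VERDICT (by name: the statement is the Claim_ definition above) =====
theorem squarefree_sanity_spec : Claim_equal_squarefree_sanity := by
  intro n limit _
  unfold Spec_squarefree_sanity squarefree_sanity squarefree_sanity_alt
  set N : Int := (n.natAbs : Int) with hN
  have hN0 : 0 ≤ N := by positivity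
  by_cases hz : N = 0
  · rw [hz]
    have hno : ∀ q, ¬ pvQ 0 limit q := by
      rintro q ⟨h2, _, hle, _⟩; nlinarith
    rw [pvALoop_none 0 limit le_rfl hno (limit + 1 - 2).toNat 2 le_rfl le_rfl]
    rw [pvBLoop_zeroN]
  · have hNpos : 0 < N := by omega
    by_cases hex : ∃ q, pvQ N limit q
    · obtain ⟨q₀, hq, hmin⟩ :=
        Int.exists_least_of_bdd (P := pvQ N limit) ⟨2, fun z hz => hz.1⟩ hex
      rw [pvALoop_found N limit q₀ hN0 hq hmin (limit + 1 - 2).toNat 2 le_rfl hq.1 le_rfl]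
      rw [pvBLoop_found N limit q₀ hNpos hq hmin (2 * n.natAbs + 2) N 2
        (pv_inv_init N limit hNpos) hq.1 (by omega)]
    · push_neg at hex
      rw [pvALoop_none N limit hN0 hex (limit + 1 - 2).toNat 2 le_rfl le_rfl]
      rw [pvBLoop_none N limit hNpos hex (2 * n.natAbs + 2) N 2
        (pv_inv_init N limit hNpos) (by omega)]
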